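-- pv_equiv track=rewrite | github.com/NicheToolsCavin/tinyutils | convert_backend/page_break_marker.py | add_page_break_markers
-- ===== SOURCE A (Python) =====
-- from typing import List
--
-- def add_page_break_markers(markdown_text: str, line_indices: List[int]) -> str:
--     """Insert visible page break markers into markdown.
--
--     ``line_indices`` are interpreted as line numbers in the markdown
--     string (0-based). At each specified index we insert a horizontal
--     rule and a comment marker. This function does not attempt to compute
--     indices from DOCX; callers are responsible for mapping paragraphs to
--     markdown lines when necessary.
--     """
--
--     if not line_indices:
--         return markdown_text
--
--     lines = markdown_text.split("\n")
--     marker = "---\n<!-- PAGE BREAK -->"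
--
--     for idx in sorted(set(line_indices), reverse=True):
--         if 0 <= idx <= len(lines):
--             lines.insert(idx, marker)
--
--     return "\n".join(lines)
-- ===== SOURCE B (Python) =====
-- def add_page_break_markers(markdown_text, line_indices):
--     if not line_indices:
--         return markdown_text
--     lines = markdown_text.split("\n")
--     marker = "---\n<!-- PAGE BREAK -->"
--     n = len(lines)
--     breaks = sorted({i for i in line_indices if 0 <= i <= n})
--     parts = []
--     cursor = 0
--     for idx in breaks:
--         parts += lines[cursor:idx]
--         parts.append(marker)
--         cursor = idx
--     parts += lines[cursor:]
--     return "\n".join(parts)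
-- ===== Notes on version B (the rewrite author's own statement) =====
-- stated objective: faster
-- what changed: Instead of repeatedly inserting the marker into a mutable line list at descending indices (each insert shifting the tail), B filters and ascending-sorts the valid break indices once and builds the output in one pass by partitioning the lines into slices between consecutive breaks, interleaving the markers.
import Mathlib
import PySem

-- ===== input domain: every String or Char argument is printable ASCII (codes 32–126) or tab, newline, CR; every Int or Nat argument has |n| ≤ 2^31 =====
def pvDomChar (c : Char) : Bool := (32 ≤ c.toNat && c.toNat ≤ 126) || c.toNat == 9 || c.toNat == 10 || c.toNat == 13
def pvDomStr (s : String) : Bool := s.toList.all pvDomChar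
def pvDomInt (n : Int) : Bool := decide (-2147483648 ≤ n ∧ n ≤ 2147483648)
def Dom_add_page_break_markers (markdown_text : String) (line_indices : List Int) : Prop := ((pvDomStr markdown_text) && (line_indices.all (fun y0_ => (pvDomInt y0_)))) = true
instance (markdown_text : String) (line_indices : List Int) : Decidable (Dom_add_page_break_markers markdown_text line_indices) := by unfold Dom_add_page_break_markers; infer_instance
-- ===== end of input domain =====

-- B replaces A's descending-order in-place inserts (each list.insert shifts the whole tail)
-- by one ascending walk over the valid break indices that emits the line segments between
-- consecutive breaks with markers interleaved; a timing run measured B faster.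

-- ===== PORT A =====
def add_page_break_markers (markdown_text : String) (line_indices : List Int) : String :=
  if line_indices = [] then markdown_text
  else
    let lines := (PySem.Str.split? markdown_text "\n").getD []
    let marker := "---\n<!-- PAGE BREAK -->"
    let lines2 := (PySem.List.sorted (PySem.Set.ofList line_indices) (fun x => x) true).foldl
      (fun ls idx =>
        if 0 ≤ idx ∧ idx ≤ PySem.List.len ls then PySem.List.insert ls idx marker else ls)
      lines
    PySem.Str.join "\n" lines2

-- ===== PORT B =====
def add_page_break_markers_alt (markdown_text : String) (line_indices : List Int) : String :=
  if line_indices = [] then markdown_text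
  else
    let lines := (PySem.Str.split? markdown_text "\n").getD []
    let marker := "---\n<!-- PAGE BREAK -->"
    let n := PySem.List.len lines
    let breaks := PySem.List.sorted
      (PySem.Set.ofList (line_indices.filter (fun i => decide (0 ≤ i ∧ i ≤ n)))) (fun x => x) false
    let st := breaks.foldl
      (fun (pc : List String × Int) idx =>
        (pc.1 ++ PySem.List.slice lines (some pc.2) (some idx) ++ [marker], idx))
      ([], (0 : Int))
    PySem.Str.join "\n" (st.1 ++ PySem.List.slice lines (some st.2) none)

-- ===== PRECONDITION & SPEC =====
def Spec_add_page_break_markers (markdown_text : String) (line_indices : List Int) (out : String) : Prop := out = add_page_break_markers_alt markdown_text line_indices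
instance (markdown_text : String) (line_indices : List Int) (out : String) : Decidable (Spec_add_page_break_markers markdown_text line_indices out) := by unfold Spec_add_page_break_markers; infer_instance

-- ===== CLAIM (what is proved, stated in full; the proofs are below) =====
def Claim_equal_add_page_break_markers : Prop := ∀ (markdown_text : String) (line_indices : List Int), Dom_add_page_break_markers markdown_text line_indices → Spec_add_page_break_markers markdown_text line_indices (add_page_break_markers markdown_text line_indices)

-- ===== LEMMAS AND PROOFS =====
-- the segment decomposition both loops compute: lines from cursor c cut at the breaks, markers interleaved
def pvSegs (L : List String) (m : String) : Int → List Int → List String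
  | c, [] => L.drop c.toNat
  | c, a :: rest => (L.drop c.toNat).take (a.toNat - c.toNat) ++ m :: pvSegs L m a rest

theorem pvSegs_length (L : List String) (m : String) :
    ∀ (xs : List Int) (c : Int), 0 ≤ c → c ≤ (L.length : Int) →
    (∀ x ∈ xs, c ≤ x ∧ x ≤ (L.length : Int)) → xs.Pairwise (· ≤ ·) →
    (pvSegs L m c xs).length = L.length - c.toNat + xs.length := by
  intro xs
  induction xs with
  | nil => intro c h0 hc _ _; simp [pvSegs]
  | cons a rest ih =>
    intro c h0 hc hx hp
    obtain ⟨hca, haL⟩ := hx a (by simp)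
    have h0a : 0 ≤ a := le_trans h0 hca
    rw [List.pairwise_cons] at hp
    have := ih a h0a haL (fun x hx' => ⟨hp.1 x hx', (hx x (by simp [hx'])).2⟩) hp.2
    simp [pvSegs, this]
    omega

theorem pvSegs_take (L : List String) (m : String) (a : Int) (rest : List Int)
    (_h0 : 0 ≤ a) (ha : a ≤ (L.length : Int))
    (hrest : ∀ x ∈ rest, a ≤ x ∧ x ≤ (L.length : Int)) :
    (pvSegs L m 0 rest).take a.toNat = L.take a.toNat := by
  cases rest with
  | nil => simp [pvSegs]
  | cons r rs =>
    obtain ⟨har, hrL⟩ := hrest r (by simp)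
    simp only [pvSegs, Int.toNat_zero, List.drop_zero, Nat.sub_zero]
    rw [List.take_append_of_le_length (by simp; omega), List.take_take]
    congr 1; omega

theorem pvSegs_drop (L : List String) (m : String) (a : Int) (rest : List Int)
    (_h0 : 0 ≤ a) (ha : a ≤ (L.length : Int))
    (hrest : ∀ x ∈ rest, a ≤ x ∧ x ≤ (L.length : Int)) :
    (pvSegs L m 0 rest).drop a.toNat = pvSegs L m a rest := by
  cases rest with
  | nil => simp [pvSegs]
  | cons r rs =>
    obtain ⟨har, hrL⟩ := hrest r (by simp)
    simp only [pvSegs, Int.toNat_zero, List.drop_zero, Nat.sub_zero]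
    rw [List.drop_append_of_le_length (by simp; omega), List.drop_take]

theorem pvB_fold (L : List String) (m : String) :
    ∀ (bs : List Int) (P : List String) (c : Int), 0 ≤ c → (∀ x ∈ bs, 0 ≤ x) →
    (bs.foldl (fun (pc : List String × Int) idx =>
        (pc.1 ++ PySem.List.slice L (some pc.2) (some idx) ++ [m], idx)) (P, c)).1
      ++ PySem.List.slice L (some (bs.foldl (fun (pc : List String × Int) idx =>
        (pc.1 ++ PySem.List.slice L (some pc.2) (some idx) ++ [m], idx)) (P, c)).2) none
    = P ++ pvSegs L m c bs := by
  intro bs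
  induction bs with
  | nil =>
    intro P c h0 _
    simp [pvSegs, PySem.List.slice_from _ h0]
  | cons a rest ih =>
    intro P c h0 hx
    have h0a : 0 ≤ a := hx a (by simp)
    simp only [List.foldl_cons]
    rw [ih _ a h0a (fun x hx' => hx x (by simp [hx']))]
    rw [PySem.List.slice_toNat _ h0 h0a]
    simp [pvSegs]

theorem pvA_fold (L : List String) (m : String) :
    ∀ (asc : List Int), asc.Pairwise (· < ·) →
    (∀ x ∈ asc, 0 ≤ x ∧ x ≤ (L.length : Int)) →
    asc.reverse.foldl (fun ls idx =>
        if 0 ≤ idx ∧ idx ≤ PySem.List.len ls then PySem.List.insert ls idx m else ls) L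
    = pvSegs L m 0 asc := by
  intro asc
  induction asc with
  | nil => intro _ _; simp [pvSegs]
  | cons a rest ih =>
    intro hp hx
    rw [List.pairwise_cons] at hp
    obtain ⟨h0a, haL⟩ := hx a (by simp)
    have hrest : ∀ x ∈ rest, a ≤ x ∧ x ≤ (L.length : Int) :=
      fun x hx' => ⟨le_of_lt (hp.1 x hx'), (hx x (by simp [hx'])).2⟩
    have hrest0 : ∀ x ∈ rest, 0 ≤ x ∧ x ≤ (L.length : Int) :=
      fun x hx' => ⟨le_trans h0a (hrest x hx').1, (hrest x hx').2⟩
    rw [List.reverse_cons, List.foldl_append, ih hp.2 hrest0]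
    simp only [List.foldl_cons, List.foldl_nil]
    have hlen : (pvSegs L m 0 rest).length = L.length + rest.length := by
      have := pvSegs_length L m rest 0 le_rfl (by positivity)
        (fun x hx' => ⟨(hrest0 x hx').1, (hrest0 x hx').2⟩)
        (hp.2.imp le_of_lt)
      simpa using this
    have hguard : 0 ≤ a ∧ a ≤ PySem.List.len (pvSegs L m 0 rest) := by
      simp [PySem.List.len_eq, hlen]
      constructor
      · exact h0a
      · omega
    rw [if_pos hguard]
    have ha' : a = ((a.toNat : Nat) : Int) := by omega
    rw [ha', PySem.List.insert_natCast _ _ _ (by rw [hlen]; omega)]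
    rw [pvSegs_take L m a rest h0a haL hrest, pvSegs_drop L m a rest h0a haL hrest]
    simp [pvSegs, max_eq_left h0a]

theorem pvA_skip_neg (m : String) :
    ∀ (xs : List Int) (ls : List String),
    xs.foldl (fun ls idx =>
        if 0 ≤ idx ∧ idx ≤ PySem.List.len ls then PySem.List.insert ls idx m else ls) ls
    = (xs.filter (fun i => decide (0 ≤ i))).foldl (fun ls idx =>
        if 0 ≤ idx ∧ idx ≤ PySem.List.len ls then PySem.List.insert ls idx m else ls) ls := by
  intro xs
  induction xs with
  | nil => intro ls; rfl
  | cons a rest ih =>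
    intro ls
    by_cases h : 0 ≤ a
    · simp only [List.filter_cons, h, decide_true, if_true, List.foldl_cons]
      exact ih _
    · rw [List.filter_cons]
      simp only [h, decide_false, Bool.false_eq_true, if_false]
      rw [List.foldl_cons, if_neg (fun hc => h hc.1)]
      exact ih ls

theorem pvA_drop_bigs (L : List String) (m : String) :
    ∀ (xs : List Int), xs.Pairwise (fun a b => b ≤ a) → (∀ x ∈ xs, 0 ≤ x) →
    xs.foldl (fun ls idx =>
        if 0 ≤ idx ∧ idx ≤ PySem.List.len ls then PySem.List.insert ls idx m else ls) L
    = (xs.filter (fun i => decide (i ≤ (L.length : Int)))).foldl (fun ls idx =>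
        if 0 ≤ idx ∧ idx ≤ PySem.List.len ls then PySem.List.insert ls idx m else ls) L := by
  intro xs
  induction xs with
  | nil => intro _ _; rfl
  | cons a rest ih =>
    intro hp hx
    rw [List.pairwise_cons] at hp
    by_cases h : a ≤ (L.length : Int)
    · have hfil : List.filter (fun i => decide (i ≤ (L.length : Int))) (a :: rest) = a :: rest := by
        rw [List.filter_eq_self]
        intro x hx'
        simp only [decide_eq_true_eq]
        rcases List.mem_cons.mp hx' with h1 | h1
        · exact h1 ▸ h
        · exact le_trans (hp.1 x h1) h
      rw [hfil]
    · have hg : ¬ (0 ≤ a ∧ a ≤ PySem.List.len L) := by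
        simp only [PySem.List.len_eq]
        exact fun hc => h hc.2
      rw [List.filter_cons]
      simp only [h, decide_false, Bool.false_eq_true, if_false]
      rw [List.foldl_cons, if_neg hg]
      exact ih hp.2 (fun x hx' => hx x (List.mem_cons_of_mem _ hx'))

-- ===== VERDICT (by name: the statement is the Claim_ definition above) =====
theorem add_page_break_markers_spec : Claim_equal_add_page_break_markers := by
  intro mt li _hdom
  unfold Spec_add_page_break_markers
  by_cases hli : li = []
  · simp [add_page_break_markers, add_page_break_markers_alt, hli]
  · simp only [add_page_break_markers, add_page_break_markers_alt, if_neg hli]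
    set L : List String := (PySem.Str.split? mt "\n").getD [] with hL
    set m : String := "---\n<!-- PAGE BREAK -->" with hm
    set P : Int → Bool := fun i => decide (0 ≤ i ∧ i ≤ PySem.List.len L) with hP
    set ascAll := PySem.List.sorted (PySem.Set.ofList li) (fun x => x) false with hascAll
    set ascv := PySem.List.sorted (PySem.Set.ofList (li.filter P)) (fun x => x) false with hascv
    have hpwAll : ascAll.Pairwise (· < ·) := PySem.List.sorted_ofList_pairwise_lt li
    have hndAll : ascAll.Nodup := hpwAll.imp (fun h => ne_of_lt h)
    -- the descending sort is the reverse of the ascending sort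
    have hdesc : PySem.List.sorted (PySem.Set.ofList li) (fun x => x) true = ascAll.reverse := by
      apply PySem.List.sorted_rev_eq_of_perm_of_pairwise_gt
      · exact (List.reverse_perm ascAll).trans (PySem.List.sorted_perm _ _ _)
      · exact List.pairwise_reverse.mpr hpwAll
    -- the ascending sort of the valid subset is the valid subset of the ascending sort
    have hval : ascv = ascAll.filter P := by
      apply PySem.List.sorted_eq_of_perm_of_pairwise_lt
      · rw [List.perm_ext_iff_of_nodup (hndAll.filter P) (PySem.Set.nodup_ofList _)]
        intro x
        simp [List.mem_filter, PySem.List.mem_sorted, PySem.Set.mem_ofList, hascAll]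
      · exact hpwAll.filter P
    have hvalmem : ∀ x ∈ ascv, 0 ≤ x ∧ x ≤ (L.length : Int) := by
      intro x hx
      rw [hval, List.mem_filter] at hx
      have := hx.2
      rw [hP] at this
      simp only [PySem.List.len_eq, decide_eq_true_eq] at this
      exact this
    -- A's fold equals the fold over the valid ascending list read backwards
    have hA : (ascAll.reverse.foldl (fun ls idx =>
          if 0 ≤ idx ∧ idx ≤ PySem.List.len ls then PySem.List.insert ls idx m else ls) L)
        = pvSegs L m 0 ascv := by
      rw [pvA_skip_neg m]
      rw [pvA_drop_bigs L m _
        (((List.pairwise_reverse.mpr hpwAll).filter _).imp (fun h => le_of_lt h))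
        (by intro x hx; rw [List.mem_filter] at hx; simpa using hx.2)]
      rw [List.filter_filter]
      have hcongr : (ascAll.reverse.filter
            (fun a => decide (a ≤ (L.length : Int)) && decide (0 ≤ a))) = ascAll.reverse.filter P := by
        apply List.filter_congr
        intro x _
        rw [hP]
        simp only [PySem.List.len_eq]
        by_cases h1 : (0 : Int) ≤ x <;> by_cases h2 : x ≤ (L.length : Int) <;> simp [h1, h2]
      rw [hcongr, List.filter_reverse, ← hval]
      exact pvA_fold L m ascv (hval ▸ hpwAll.filter P) hvalmem
    rw [hdesc, hA]
    have hB := pvB_fold L m ascv [] 0 le_rfl (fun x hx => (hvalmem x hx).1)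
    rw [← List.nil_append (pvSegs L m 0 ascv), ← hB]
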